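-- pv_equiv track=rewrite | github.com/ShabnamRad/MIR_project | index_compression.py | sequence_to_vb_code
-- ===== SOURCE A (Python) =====
-- def sequence_to_vb_code(seq):
--     if not seq:
--         return ""
--
--     vb_code = ""
--     gap_seq = [seq[0]]
--     for i in range(1, len(seq)):
--         gap_seq.append(seq[i] - seq[i - 1])
--
--     for num in gap_seq:
--         binary_num = bin(num)[2:]
--
--         num_vb_code = ""
--         first_bit = "1"
--         while len(binary_num) > 7:
--             code = first_bit + binary_num[-7:]
--             binary_num = binary_num[:-7]
--             first_bit = "0"
--             num_vb_code = code + num_vb_code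
--
--         if len(binary_num) > 0:
--             code = first_bit + "0" * (7 - len(binary_num)) + binary_num
--             num_vb_code = code + num_vb_code
--
--         vb_code += num_vb_code
--
--     return vb_code
-- ===== SOURCE B (Python) =====
-- def sequence_to_vb_code(seq):
--     if not seq:
--         return ""
--     gaps = [seq[0]] + [b - a for a, b in zip(seq, seq[1:])]
--     out = []
--     for num in gaps:
--         s = bin(num)[2:]
--         pad = (7 - len(s) % 7) % 7
--         p = "0" * pad + s
--         chunks = [p[i:i + 7] for i in range(0, len(p), 7)]
--         out.append("".join(("1" if i == len(chunks) - 1 else "0") + c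
--                            for i, c in enumerate(chunks)))
--     return "".join(out)
-- ===== Notes on version B (the rewrite author's own statement) =====
-- stated objective: alternative
-- what changed: Gaps are computed by zipping the list with its tail instead of an indexed loop, and each gap is encoded by left-padding its binary string to a multiple of 7 and chunking it forward with marker bits, replacing A's right-to-left peel-and-prepend while loop.
import Mathlib
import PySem

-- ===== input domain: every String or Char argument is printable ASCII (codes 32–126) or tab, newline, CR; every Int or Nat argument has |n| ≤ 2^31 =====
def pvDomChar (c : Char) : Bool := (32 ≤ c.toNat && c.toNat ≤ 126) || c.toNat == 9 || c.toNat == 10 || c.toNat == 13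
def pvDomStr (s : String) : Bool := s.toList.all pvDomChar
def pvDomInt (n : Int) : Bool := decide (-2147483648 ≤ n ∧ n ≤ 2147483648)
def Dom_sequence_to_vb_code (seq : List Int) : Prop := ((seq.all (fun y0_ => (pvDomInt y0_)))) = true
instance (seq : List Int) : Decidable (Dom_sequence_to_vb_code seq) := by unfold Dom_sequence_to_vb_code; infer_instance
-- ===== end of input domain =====

-- B re-encodes each gap by pad-then-forward-chunk instead of A's right-to-left peel loop,
-- and computes gaps by zipping instead of an indexed loop; same return value everywhere.

-- ===== PORT A =====
-- bin(n) for a positive n without the '0b' prefix (digits MSB first)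
def pyBinNatAux : Nat → List Char
  | 0 => []
  | n+1 => pyBinNatAux ((n+1)/2) ++ [if (n+1) % 2 = 1 then '1' else '0']

-- bin(n)[2:] : for n ≥ 0 the binary digits; for n < 0 Python gives '-0b…', so [2:] is 'b'+digits(|n|)
def pyBin2 (n : Int) : List Char :=
  if n < 0 then 'b' :: pyBinNatAux n.natAbs
  else if n = 0 then ['0'] else pyBinNatAux n.toNat

-- A's while loop: binary_num[-7:] = drop (len-7), binary_num[:-7] = take (len-7) — exact since len > 7
def peelA (s : List Char) (firstBit : Char) (acc : List Char) : List Char :=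
  if s.length > 7 then
    peelA (s.take (s.length - 7)) '0' ((firstBit :: s.drop (s.length - 7)) ++ acc)
  else if s.length > 0 then (firstBit :: List.replicate (7 - s.length) '0' ++ s) ++ acc
  else acc
termination_by s.length
decreasing_by simp; omega

def sequence_to_vb_code (seq : List Int) : String :=
  if seq = [] then "" else
  let gap_seq := (PySem.List.pyRange 1 (seq.length : Int) 1).foldl
    (fun g i => g ++ [PySem.List.pyGetD seq i 0 - PySem.List.pyGetD seq (i-1) 0])
    [PySem.List.pyGetD seq 0 0]
  String.mk (gap_seq.foldl (fun acc num => acc ++ peelA (pyBin2 num) '1' []) [])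

-- ===== PORT B =====
-- consecutive 7-char chunks, left to right
def chunks7 (s : List Char) : List (List Char) :=
  if s = [] then [] else s.take 7 :: chunks7 (s.drop 7)
termination_by s.length
decreasing_by rename_i h; simp [List.length_pos_iff.mpr h]

-- '1' before the last chunk, '0' before every other
def markLast : List (List Char) → List Char
  | [] => []
  | [c] => '1' :: c
  | c :: rest => ('0' :: c) ++ markLast rest

def encodeB (num : Int) : List Char :=
  let s := pyBin2 num
  markLast (chunks7 (List.replicate ((7 - s.length % 7) % 7) '0' ++ s))

def sequence_to_vb_code_alt (seq : List Int) : String :=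
  match seq with
  | [] => ""
  | s0 :: rest =>
    String.mk (((s0 :: ((s0 :: rest).zip rest).map (fun p => p.2 - p.1)).flatMap encodeB))

-- ===== PRECONDITION & SPEC =====
def Spec_sequence_to_vb_code (seq : List Int) (out : String) : Prop := out = sequence_to_vb_code_alt seq
instance (seq : List Int) (out : String) : Decidable (Spec_sequence_to_vb_code seq out) := by unfold Spec_sequence_to_vb_code; infer_instance

-- ===== CLAIM (what is proved, stated in full; the proofs are below) =====
def Claim_equal_sequence_to_vb_code : Prop := ∀ (seq : List Int), Dom_sequence_to_vb_code seq → Spec_sequence_to_vb_code seq (sequence_to_vb_code seq)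

-- ===== LEMMAS AND PROOFS =====

-- markLast with a parametric marker for the last chunk
def markWith (fb : Char) : List (List Char) → List Char
  | [] => []
  | [c] => fb :: c
  | c :: rest => ('0' :: c) ++ markWith fb rest

theorem markWith_one (l : List (List Char)) : markWith '1' l = markLast l := by
  induction l with
  | nil => rfl
  | cons c rest ih =>
    cases rest with
    | nil => rfl
    | cons d t =>
      show ('0' :: c) ++ markWith '1' (d :: t) = ('0' :: c) ++ markLast (d :: t)
      rw [ih]

theorem markWith_zero (l : List (List Char)) : markWith '0' l = l.flatMap ('0' :: ·) := by
  induction l with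
  | nil => rfl
  | cons c rest ih =>
    cases rest with
    | nil => simp [markWith]
    | cons d t =>
      show ('0' :: c) ++ markWith '0' (d :: t) = List.flatMap (fun x => '0' :: x) (c :: d :: t)
      rw [ih]; simp

theorem markWith_append_last (fb : Char) (C : List (List Char)) (d : List Char) :
    markWith fb (C ++ [d]) = C.flatMap ('0' :: ·) ++ (fb :: d) := by
  induction C with
  | nil => rfl
  | cons c rest ih =>
    cases rest with
    | nil => simp [markWith]
    | cons e t =>
      show ('0' :: c) ++ markWith fb ((e :: t) ++ [d]) = _
      rw [ih]; simp [List.append_assoc]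

theorem chunks7_nil : chunks7 [] = [] := by rw [chunks7]; simp

theorem chunks7_of_len7 (s : List Char) (h : s.length = 7) : chunks7 s = [s] := by
  have hne : s ≠ [] := by intro hc; rw [hc] at h; simp at h
  rw [chunks7, if_neg hne, List.take_of_length_le (by omega),
      List.drop_eq_nil_of_le (by omega), chunks7_nil]

theorem chunks7_append (n : Nat) (X d : List Char) (h : X.length = 7 * n) :
    chunks7 (X ++ d) = chunks7 X ++ chunks7 d := by
  induction n generalizing X with
  | zero =>
    have : X = [] := List.length_eq_zero_iff.mp (by omega)
    simp [this, chunks7_nil]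
  | succ m ih =>
    have hx : X ≠ [] := by intro hc; rw [hc] at h; simp at h
    have hlen : 7 ≤ X.length := by omega
    rw [chunks7, if_neg (by simp [hx])]
    rw [List.take_append_of_le_length hlen, List.drop_append_of_le_length hlen,
        ih (X.drop 7) (by rw [List.length_drop]; omega)]
    conv_rhs => rw [chunks7]
    simp [hx]

-- the heart: A's peel loop equals B's pad-then-chunk pass
theorem peel_eq_mark (n : Nat) : ∀ (s : List Char), s.length = n → s ≠ [] → ∀ (fb : Char) (acc : List Char),
    peelA s fb acc =
      markWith fb (chunks7 (List.replicate ((7 - s.length % 7) % 7) '0' ++ s)) ++ acc := by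
  induction n using Nat.strong_induction_on with
  | _ n ih =>
    intro s hlen hne fb acc
    by_cases h7 : s.length > 7
    · -- peel one chunk from the right
      rw [peelA, if_pos h7]
      have htl : (s.take (s.length - 7)).length = s.length - 7 := by
        rw [List.length_take]; omega
      have htne : s.take (s.length - 7) ≠ [] := by
        intro hc; rw [hc] at htl; simp at htl; omega
      rw [ih (s.length - 7) (by omega) _ htl htne '0' ((fb :: s.drop (s.length - 7)) ++ acc)]
      rw [htl]
      set p := (7 - s.length % 7) % 7 with hpdef
      have hmod : (7 - (s.length - 7) % 7) % 7 = p := by rw [hpdef]; omega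
      rw [hmod]
      have hd7 : (s.drop (s.length - 7)).length = 7 := by rw [List.length_drop]; omega
      have hX : (List.replicate p '0' ++ s.take (s.length - 7)).length
          = 7 * ((p + (s.length - 7)) / 7) := by
        rw [List.length_append, List.length_replicate, htl, hpdef]; omega
      have key : markWith fb (chunks7 (List.replicate p '0' ++ s))
          = markWith '0' (chunks7 (List.replicate p '0' ++ s.take (s.length - 7)))
              ++ (fb :: s.drop (s.length - 7)) := by
        conv_lhs => rw [show List.replicate p '0' ++ s
          = (List.replicate p '0' ++ s.take (s.length - 7)) ++ s.drop (s.length - 7) by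
            rw [List.append_assoc, List.take_append_drop]]
        rw [chunks7_append _ _ _ hX, chunks7_of_len7 _ hd7, markWith_append_last,
            ← markWith_zero]
      rw [key, List.append_assoc]
    · -- final (≤ 7 char) chunk
      have hpos : s.length > 0 := List.length_pos_iff.mpr hne
      rw [peelA, if_neg h7, if_pos hpos]
      have hp : (7 - s.length % 7) % 7 = 7 - s.length := by omega
      rw [hp, chunks7_of_len7 _ (by rw [List.length_append, List.length_replicate]; omega)]
      simp [markWith]

theorem pyBinNatAux_ne_nil (n : Nat) (h : n ≠ 0) : pyBinNatAux n ≠ [] := by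
  cases n with
  | zero => exact absurd rfl h
  | succ m => rw [pyBinNatAux]; simp

theorem pyBin2_ne_nil (n : Int) : pyBin2 n ≠ [] := by
  unfold pyBin2
  split_ifs with h1 h2
  · simp
  · simp
  · exact pyBinNatAux_ne_nil _ (by omega)

theorem encode_eq (num : Int) : peelA (pyBin2 num) '1' [] = encodeB num := by
  rw [peel_eq_mark (pyBin2 num).length _ rfl (pyBin2_ne_nil num), markWith_one]
  simp [encodeB]

-- A's gap list (via index loop) equals B's gap list (via zip), in getD form
theorem gaps_getD_eq_zip (seq : List Int) :
    (List.range (seq.length - 1)).map (fun k => seq.getD (k+1) 0 - seq.getD k 0)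
      = (seq.zip seq.tail).map (fun p => p.2 - p.1) := by
  induction seq with
  | nil => simp
  | cons a rest ih =>
    cases rest with
    | nil => simp
    | cons b t =>
      have hl : (a :: b :: t).length - 1 = ((b :: t).length - 1) + 1 := by simp
      rw [hl, List.range_succ_eq_map, List.map_cons, List.map_map,
          List.tail_cons, List.zip_cons_cons, List.map_cons]
      simp only [List.tail_cons] at ih
      refine congrArg₂ _ (by simp) ?_
      rw [← ih]
      rfl

theorem foldl_concat_flatMap (f : Int → List Char) (l : List Int) (acc : List Char) :
    l.foldl (fun acc num => acc ++ f num) acc = acc ++ l.flatMap f := by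
  induction l generalizing acc with
  | nil => simp
  | cons x t ih => simp [ih, List.append_assoc]

-- ===== VERDICT (by name: the statement is the Claim_ definition above) =====
theorem sequence_to_vb_code_spec : Claim_equal_sequence_to_vb_code := by
  intro seq _
  unfold Spec_sequence_to_vb_code sequence_to_vb_code sequence_to_vb_code_alt
  cases seq with
  | nil => rfl
  | cons s0 rest =>
    rw [if_neg (by simp)]
    dsimp only
    rw [foldl_concat_flatMap]
    simp only [List.nil_append, encode_eq]
    congr 1
    rw [PySem.List.foldl_append_singleton_eq_map, PySem.List.pyGetD_zero_cons]
    congr 1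
    have hcast : ∀ k : Nat, PySem.List.pyGetD (s0 :: rest) (1 + (k : Int)) 0
        - PySem.List.pyGetD (s0 :: rest) (1 + (k : Int) - 1) 0
        = (s0 :: rest).getD (k+1) 0 - (s0 :: rest).getD k 0 := by
      intro k
      have h1 : (1 + (k : Int)) = ((k + 1 : Nat) : Int) := by push_cast; ring
      have h2 : (1 + (k : Int) - 1) = ((k : Nat) : Int) := by ring
      rw [h2, h1, PySem.List.pyGetD_natCast, PySem.List.pyGetD_natCast]
    rw [PySem.List.pyRange_one, List.map_map]
    have h1 : (((s0 :: rest).length : Int) - 1).toNat = (s0 :: rest).length - 1 := by simp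
    rw [h1]
    have hmapc := List.map_congr_left
      (l := List.range ((s0 :: rest).length - 1))
      (f := (fun i => PySem.List.pyGetD (s0 :: rest) i 0 - PySem.List.pyGetD (s0 :: rest) (i - 1) 0)
        ∘ fun k : Nat => 1 + (k : Int))
      (g := fun k => (s0 :: rest).getD (k + 1) 0 - (s0 :: rest).getD k 0)
      (fun k _ => hcast k)
    rw [hmapc, List.singleton_append]
    have hz := gaps_getD_eq_zip (s0 :: rest)
    simp only [List.tail_cons] at hz
    rw [hz]
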